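-- pv_equiv track=rewrite | github.com/lavelock67/universal_symantics | nsm_pivot_cleaner.py | _parse_explication_components
-- ===== SOURCE A (Python) =====
-- from typing import Dict, List, Tuple, Any, Optional, Set, Union
--
-- def _parse_explication_components(explication: str) -> Dict[str, List[str]]:
--     """Parse explication into component categories."""
--     components = {
--         'scope': [],
--         'modality': [],
--         'tense_aspect': [],
--         'predicate_roles': [],
--         'adjuncts': []
--     }
--
--     words = explication.split()
--
--     for word in words:
--         if word in ['NOT', 'NEG']:
--             components['scope'].append(word)
--         elif word in ['CAN', 'MUST', 'SHOULD', 'MIGHT', 'WILL']: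
--             components['modality'].append(word)
--         elif word in ['PAST', 'FUTURE', 'PRESENT', 'BEFORE', 'AFTER']:
--             components['tense_aspect'].append(word)
--         elif word in ['DO', 'HAPPEN', 'CAUSE', 'LIKE', 'WANT', 'THINK', 'KNOW']:
--             components['predicate_roles'].append(word)
--         else:
--             components['adjuncts'].append(word)
--
--     return components
-- ===== SOURCE B (Python) =====
-- SCOPE_WORDS = {'NOT', 'NEG'}
-- MODALITY_WORDS = {'CAN', 'MUST', 'SHOULD', 'MIGHT', 'WILL'}
-- TENSE_WORDS = {'PAST', 'FUTURE', 'PRESENT', 'BEFORE', 'AFTER'}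
-- PREDICATE_WORDS = {'DO', 'HAPPEN', 'CAUSE', 'LIKE', 'WANT', 'THINK', 'KNOW'}
-- ALL_KEYWORDS = SCOPE_WORDS | MODALITY_WORDS | TENSE_WORDS | PREDICATE_WORDS
--
--
-- def _parse_explication_components(explication: str):
--     """Parse explication into component categories via per-bucket filtering passes."""
--     words = explication.split()
--     return {
--         'scope': [w for w in words if w in SCOPE_WORDS],
--         'modality': [w for w in words if w in MODALITY_WORDS],
--         'tense_aspect': [w for w in words if w in TENSE_WORDS],
--         'predicate_roles': [w for w in words if w in PREDICATE_WORDS],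
--         'adjuncts': [w for w in words if w not in ALL_KEYWORDS],
--     }
-- ===== Notes on version B (the rewrite author's own statement) =====
-- stated objective: simpler
-- what changed: Replaced the single stateful branching loop that appends into a mutable dict with five independent filtering comprehensions over fixed keyword sets, one per bucket.
import Mathlib
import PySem

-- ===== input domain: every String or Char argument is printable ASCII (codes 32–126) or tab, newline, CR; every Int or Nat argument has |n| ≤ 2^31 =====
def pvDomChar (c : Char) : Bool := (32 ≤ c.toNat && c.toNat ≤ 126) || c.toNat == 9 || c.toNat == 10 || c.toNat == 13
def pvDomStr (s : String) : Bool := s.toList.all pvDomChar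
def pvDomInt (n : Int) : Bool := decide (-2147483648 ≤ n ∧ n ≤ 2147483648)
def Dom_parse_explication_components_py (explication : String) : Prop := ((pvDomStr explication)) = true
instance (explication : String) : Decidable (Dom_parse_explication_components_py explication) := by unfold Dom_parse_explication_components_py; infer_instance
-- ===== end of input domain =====

-- B replaces A's single branching loop over a mutable dict with five independent
-- filtering passes over fixed keyword lists (objective: simpler).

-- ===== PORT A =====
-- one loop iteration of A: classify the word and append it into the matching bucket
def pvAStep (comps : PySem.Dict String (List String)) (word : String) :
    PySem.Dict String (List String) :=
  if word ∈ ["NOT", "NEG"] then comps.modify "scope" [] (· ++ [word])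
  else if word ∈ ["CAN", "MUST", "SHOULD", "MIGHT", "WILL"] then
    comps.modify "modality" [] (· ++ [word])
  else if word ∈ ["PAST", "FUTURE", "PRESENT", "BEFORE", "AFTER"] then
    comps.modify "tense_aspect" [] (· ++ [word])
  else if word ∈ ["DO", "HAPPEN", "CAUSE", "LIKE", "WANT", "THINK", "KNOW"] then
    comps.modify "predicate_roles" [] (· ++ [word])
  else comps.modify "adjuncts" [] (· ++ [word])

def parse_explication_components_py (explication : String) : List (String × List String) :=
  let components : PySem.Dict String (List String) :=
    PySem.Dict.ofList [("scope", []), ("modality", []), ("tense_aspect", []),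
      ("predicate_roles", []), ("adjuncts", [])]
  let words := PySem.Str.split₀ explication
  (words.foldl pvAStep components).items

-- ===== PORT B =====
def pvScopeK : List String := ["NOT", "NEG"]
def pvModK : List String := ["CAN", "MUST", "SHOULD", "MIGHT", "WILL"]
def pvTenseK : List String := ["PAST", "FUTURE", "PRESENT", "BEFORE", "AFTER"]
def pvPredK : List String := ["DO", "HAPPEN", "CAUSE", "LIKE", "WANT", "THINK", "KNOW"]
def pvAllK : List String := pvScopeK ++ pvModK ++ pvTenseK ++ pvPredK

def parse_explication_components_py_alt (explication : String) :
    List (String × List String) :=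
  let words := PySem.Str.split₀ explication
  [("scope", words.filter (pvScopeK.contains ·)),
   ("modality", words.filter (pvModK.contains ·)),
   ("tense_aspect", words.filter (pvTenseK.contains ·)),
   ("predicate_roles", words.filter (pvPredK.contains ·)),
   ("adjuncts", words.filter (fun w => !pvAllK.contains w))]

-- ===== PRECONDITION & SPEC =====
def Spec_parse_explication_components_py (explication : String) (out : List (String × List String)) : Prop := out = parse_explication_components_py_alt explication
instance (explication : String) (out : List (String × List String)) : Decidable (Spec_parse_explication_components_py explication out) := by unfold Spec_parse_explication_components_py; infer_instance

-- ===== CLAIM (what is proved, stated in full; the proofs are below) =====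
def Claim_equal_parse_explication_components_py : Prop := ∀ (explication : String), Dom_parse_explication_components_py explication → Spec_parse_explication_components_py explication (parse_explication_components_py explication)

-- ===== LEMMAS AND PROOFS =====

-- the loop invariant: folding A's step over any word list, starting from a dict holding
-- the five buckets s m t p a, appends to each bucket exactly B's filter of the word list
theorem pvA_loop (ws : List String) (s m t p a : List String) :
    (ws.foldl pvAStep (PySem.Dict.mk
      [("scope", s), ("modality", m), ("tense_aspect", t),
       ("predicate_roles", p), ("adjuncts", a)])).items
    = [("scope", s ++ ws.filter (pvScopeK.contains ·)),
       ("modality", m ++ ws.filter (pvModK.contains ·)),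
       ("tense_aspect", t ++ ws.filter (pvTenseK.contains ·)),
       ("predicate_roles", p ++ ws.filter (pvPredK.contains ·)),
       ("adjuncts", a ++ ws.filter (fun w => !pvAllK.contains w))] := by
  induction ws generalizing s m t p a with
  | nil => simp
  | cons w ws ih =>
    simp only [List.foldl_cons, pvAStep]
    split_ifs with h1 h2 h3 h4
    · have hd : PySem.Dict.modify (PySem.Dict.mk
        [("scope", s), ("modality", m), ("tense_aspect", t),
         ("predicate_roles", p), ("adjuncts", a)]) "scope" [] (· ++ [w])
        = PySem.Dict.mk [("scope", s ++ [w]), ("modality", m), ("tense_aspect", t),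
          ("predicate_roles", p), ("adjuncts", a)] := by
        simp [PySem.Dict.modify, PySem.Dict.get?, PySem.Dict.insert, PySem.Dict.getD]
      rw [hd, ih]
      simp only [List.mem_cons, List.not_mem_nil, or_false] at h1
      rcases h1 with rfl | rfl <;>
        simp [pvScopeK, pvModK, pvTenseK, pvPredK, pvAllK]
    · have hd : PySem.Dict.modify (PySem.Dict.mk
        [("scope", s), ("modality", m), ("tense_aspect", t),
         ("predicate_roles", p), ("adjuncts", a)]) "modality" [] (· ++ [w])
        = PySem.Dict.mk [("scope", s), ("modality", m ++ [w]), ("tense_aspect", t),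
          ("predicate_roles", p), ("adjuncts", a)] := by
        simp [PySem.Dict.modify, PySem.Dict.get?, PySem.Dict.insert, PySem.Dict.getD]
      rw [hd, ih]
      simp only [List.mem_cons, List.not_mem_nil, or_false] at h2
      rcases h2 with rfl | rfl | rfl | rfl | rfl <;>
        simp [pvScopeK, pvModK, pvTenseK, pvPredK, pvAllK]
    · have hd : PySem.Dict.modify (PySem.Dict.mk
        [("scope", s), ("modality", m), ("tense_aspect", t),
         ("predicate_roles", p), ("adjuncts", a)]) "tense_aspect" [] (· ++ [w])
        = PySem.Dict.mk [("scope", s), ("modality", m), ("tense_aspect", t ++ [w]),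
          ("predicate_roles", p), ("adjuncts", a)] := by
        simp [PySem.Dict.modify, PySem.Dict.get?, PySem.Dict.insert, PySem.Dict.getD]
      rw [hd, ih]
      simp only [List.mem_cons, List.not_mem_nil, or_false] at h3
      rcases h3 with rfl | rfl | rfl | rfl | rfl <;>
        simp [pvScopeK, pvModK, pvTenseK, pvPredK, pvAllK]
    · have hd : PySem.Dict.modify (PySem.Dict.mk
        [("scope", s), ("modality", m), ("tense_aspect", t),
         ("predicate_roles", p), ("adjuncts", a)]) "predicate_roles" [] (· ++ [w])
        = PySem.Dict.mk [("scope", s), ("modality", m), ("tense_aspect", t),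
          ("predicate_roles", p ++ [w]), ("adjuncts", a)] := by
        simp [PySem.Dict.modify, PySem.Dict.get?, PySem.Dict.insert, PySem.Dict.getD]
      rw [hd, ih]
      simp only [List.mem_cons, List.not_mem_nil, or_false] at h4
      rcases h4 with rfl | rfl | rfl | rfl | rfl | rfl | rfl <;>
        simp [pvScopeK, pvModK, pvTenseK, pvPredK, pvAllK]
    · have hd : PySem.Dict.modify (PySem.Dict.mk
        [("scope", s), ("modality", m), ("tense_aspect", t),
         ("predicate_roles", p), ("adjuncts", a)]) "adjuncts" [] (· ++ [w])
        = PySem.Dict.mk [("scope", s), ("modality", m), ("tense_aspect", t),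
          ("predicate_roles", p), ("adjuncts", a ++ [w])] := by
        simp [PySem.Dict.modify, PySem.Dict.get?, PySem.Dict.insert, PySem.Dict.getD]
      rw [hd, ih]
      simp only [List.mem_cons, List.not_mem_nil, or_false, not_or] at h1 h2 h3 h4
      obtain ⟨e1, e2⟩ := h1
      obtain ⟨e3, e4, e5, e6, e7⟩ := h2
      obtain ⟨e8, e9, e10, e11, e12⟩ := h3
      obtain ⟨e13, e14, e15, e16, e17, e18, e19⟩ := h4
      simp [pvScopeK, pvModK, pvTenseK, pvPredK, pvAllK,
        e1, e2, e3, e4, e5, e6, e7, e8, e9, e10, e11, e12, e13, e14, e15, e16, e17, e18, e19]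

-- ===== VERDICT (by name: the statement is the Claim_ definition above) =====
theorem parse_explication_components_py_spec : Claim_equal_parse_explication_components_py := by
  intro explication _
  unfold Spec_parse_explication_components_py parse_explication_components_py
    parse_explication_components_py_alt
  have hof : PySem.Dict.ofList
      ([("scope", []), ("modality", []), ("tense_aspect", []),
        ("predicate_roles", []), ("adjuncts", [])] : List (String × List String))
      = PySem.Dict.mk [("scope", []), ("modality", []), ("tense_aspect", []),
        ("predicate_roles", []), ("adjuncts", [])] := by rfl
  simp only [hof, pvA_loop, List.nil_append]
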